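-- pv_equiv track=rewrite | github.com/vortsghost2025/FreeAgent | phase-6/medical_data_poc/safe_loader.py | has_pii_like_header
-- ===== SOURCE A (Python) =====
-- from typing import Dict, Iterable, List, Optional, Sequence, Tuple
--
-- PII_TOKENS = [
--     "name",
--     "ssn",
--     "phone",
--     "email",
--     "address",
--     "dob",
--     "birth",
--     "mrn",
--     "patientid",
--     "patient_id",
--     "memberid",
-- ]
--
-- def normalize_header(value: str) -> str:
--     return "".join(ch.lower() for ch in value if ch.isalnum())
--
-- def has_pii_like_header(headers: Sequence[str]) -> Optional[str]:
--     for header in headers: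
--         normalized = normalize_header(header)
--         for token in PII_TOKENS:
--             token_norm = normalize_header(token)
--             if token_norm and token_norm in normalized:
--                 return header
--     return None
-- ===== SOURCE B (Python) =====
-- from typing import Optional, Sequence
--
-- PII_TOKENS = [
--     "name",
--     "ssn",
--     "phone",
--     "email",
--     "address",
--     "dob",
--     "birth",
--     "mrn",
--     "patientid",
--     "patient_id",
--     "memberid",
-- ]
--
-- def _normalize(value: str) -> str:
--     return "".join(c for c in value if c.isalnum()).lower()
--
-- # deduplicated nonempty normalized tokens, computed once at import time
-- _TOKENS = [t for t in dict.fromkeys(map(_normalize, PII_TOKENS)) if t]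
--
-- def has_pii_like_header(headers: Sequence[str]) -> Optional[str]:
--     # Online multi-pattern matcher: stream each header's characters once,
--     # keeping a worklist of still-viable token suffixes; fresh tokens are
--     # injected at every alnum position, and a match is reported the moment
--     # a suffix empties.  No normalized string is ever built.
--     for header in headers:
--         pending = []  # suffixes of tokens whose consumed part matched the recent chars
--         for ch in header:
--             if not ch.isalnum():
--                 continue
--             c = ch.lower()
--             nxt = []
--             for rem in pending + _TOKENS:
--                 if rem[0] == c:
--                     if len(rem) == 1:
--                         return header
--                     nxt.append(rem[1:])
--             pending = nxt
--     return None
-- ===== Notes on version B (the rewrite author's own statement) =====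
-- stated objective: alternative
-- what changed: B never builds a normalized string or does substring search: it precomputes the deduplicated nonempty normalized tokens once, then streams each header's characters in a single pass, maintaining a worklist of still-viable token suffixes (fresh tokens injected at every alnum position) and returning the header the moment a suffix is fully consumed, whereas A normalizes header and tokens per header and runs a substring containment test per token.
import Mathlib
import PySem

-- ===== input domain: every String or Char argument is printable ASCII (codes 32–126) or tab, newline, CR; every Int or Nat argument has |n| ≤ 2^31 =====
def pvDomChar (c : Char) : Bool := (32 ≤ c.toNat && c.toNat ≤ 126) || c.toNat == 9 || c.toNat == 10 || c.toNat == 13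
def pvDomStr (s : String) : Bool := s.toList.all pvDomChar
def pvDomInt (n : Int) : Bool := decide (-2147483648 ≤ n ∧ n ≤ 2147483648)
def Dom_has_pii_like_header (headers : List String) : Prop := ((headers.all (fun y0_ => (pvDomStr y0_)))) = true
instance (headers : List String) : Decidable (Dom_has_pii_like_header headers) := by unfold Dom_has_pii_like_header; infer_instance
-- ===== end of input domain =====

-- B replaces A's normalize-then-substring-search by an online multi-pattern matcher: one streaming
-- pass over each header's raw characters maintaining a worklist of still-viable token suffixes;
-- objective: alternative (same result, no normalized string and no substring search ever built).

-- ===== PORT A =====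
def pvPiiTokens : List String :=
  ["name", "ssn", "phone", "email", "address", "dob", "birth", "mrn",
   "patientid", "patient_id", "memberid"]

-- ''.join(ch.lower() for ch in value if ch.isalnum()), on List Char
def pvNormA (cs : List Char) : List Char :=
  cs.flatMap (fun ch => if PySem.Chars.isalnum ch then [PySem.Chars.lowerChar ch] else [])

def has_pii_like_header : List String → Option String
  | [] => none
  | header :: rest =>
    let normalized := pvNormA header.toList
    if pvPiiTokens.any (fun tok =>
        let token_norm := pvNormA tok.toList
        !token_norm.isEmpty && PySem.Chars.isIn token_norm normalized)
    then some header
    else has_pii_like_header rest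

-- ===== PORT B =====
-- ''.join(c for c in value if c.isalnum()).lower(), on List Char
def pvNormB (cs : List Char) : List Char :=
  PySem.Chars.lower (cs.filter PySem.Chars.isalnum)

-- _TOKENS = [t for t in dict.fromkeys(map(_normalize, PII_TOKENS)) if t]
def pvTokensNorm : List (List Char) :=
  (PySem.List.dedup (pvPiiTokens.map (fun t => pvNormB t.toList))).filter (fun t => !t.isEmpty)

-- the inner 'for rem in pending + _TOKENS' loop: advance every suffix whose head is c;
-- 'none' = some suffix was fully consumed (Python's early 'return header').
-- (pending never contains []: the '[] :: rs' branch is unreachable for our inputs.)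
def pvAdvance (c : Char) : List (List Char) → Option (List (List Char))
  | [] => some []
  | [] :: rs => pvAdvance c rs
  | (d :: ds) :: rs =>
    if d == c then
      if ds.isEmpty then none
      else (pvAdvance c rs).map (fun nxt => ds :: nxt)
    else pvAdvance c rs

-- the 'for ch in header' loop with its per-character worklist
def pvStepScan : List Char → List (List Char) → Bool
  | [], _ => false
  | ch :: rest, pending =>
    if PySem.Chars.isalnum ch then
      match pvAdvance (PySem.Chars.lowerChar ch) (pending ++ pvTokensNorm) with
      | none => true
      | some nxt => pvStepScan rest nxt
    else pvStepScan rest pending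

def has_pii_like_header_alt : List String → Option String
  | [] => none
  | header :: rest =>
    if pvStepScan header.toList [] then some header
    else has_pii_like_header_alt rest

-- ===== PRECONDITION & SPEC =====
def Spec_has_pii_like_header (headers : List String) (out : Option String) : Prop := out = has_pii_like_header_alt headers
instance (headers : List String) (out : Option String) : Decidable (Spec_has_pii_like_header headers out) := by unfold Spec_has_pii_like_header; infer_instance

-- ===== CLAIM (what is proved, stated in full; the proofs are below) =====
def Claim_equal_has_pii_like_header : Prop := ∀ (headers : List String), Dom_has_pii_like_header headers → Spec_has_pii_like_header headers (has_pii_like_header headers)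

-- ===== LEMMAS AND PROOFS =====

-- the two normalizations agree
lemma pvNorm_eq (cs : List Char) : pvNormA cs = pvNormB cs := by
  induction cs with
  | nil => rfl
  | cons c t ih =>
    simp only [pvNormA, pvNormB, PySem.Chars.lower, List.flatMap_cons, List.filter_cons] at *
    by_cases h : PySem.Chars.isalnum c <;> simp [h, ih]

lemma pvNormA_cons (c : Char) (t : List Char) :
    pvNormA (c :: t)
      = if PySem.Chars.isalnum c then PySem.Chars.lowerChar c :: pvNormA t else pvNormA t := by
  by_cases h : PySem.Chars.isalnum c <;> simp [pvNormA, h]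

-- every precomputed token is nonempty
lemma pvToks_ne : ∀ t ∈ pvTokensNorm, t ≠ [] := by decide

-- pvAdvance returns none exactly when some suffix is [c]
lemma pvAdvance_none_iff (c : Char) (rs : List (List Char)) :
    pvAdvance c rs = none ↔ [c] ∈ rs := by
  induction rs with
  | nil => simp [pvAdvance]
  | cons r rs ih =>
    match r with
    | [] => simpa [pvAdvance] using ih
    | d :: ds =>
      by_cases hd : d = c
      · subst hd
        by_cases he : ds = []
        · subst he; simp [pvAdvance]
        · rw [show pvAdvance d ((d :: ds) :: rs) = (pvAdvance d rs).map (ds :: ·) by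
              simp [pvAdvance, he]]
          rw [Option.map_eq_none_iff, ih, List.mem_cons]
          constructor
          · exact Or.inr
          · rintro (h | h)
            · injection h with _ h2; exact absurd h2.symm he
            · exact h
      · rw [show pvAdvance c ((d :: ds) :: rs) = pvAdvance c rs by simp [pvAdvance, hd]]
        rw [ih, List.mem_cons]
        constructor
        · exact Or.inr
        · rintro (h | h)
          · injection h with h1 _; exact absurd h1.symm hd
          · exact h

-- membership in the advanced worklist
lemma pvAdvance_some_mem (c : Char) (rs : List (List Char)) :
    ∀ nxt, pvAdvance c rs = some nxt → ∀ r, r ∈ nxt ↔ (r ≠ [] ∧ (c :: r) ∈ rs) := by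
  induction rs with
  | nil => intro nxt h r; simp [pvAdvance] at h; subst h; simp
  | cons q rs ih =>
    intro nxt h r
    match q with
    | [] =>
      rw [ih nxt (by simpa [pvAdvance] using h) r]
      simp
    | d :: ds =>
      by_cases hd : d = c
      · subst hd
        by_cases he : ds = []
        · subst he; simp [pvAdvance] at h
        · rw [show pvAdvance d ((d :: ds) :: rs) = (pvAdvance d rs).map (ds :: ·) by
              simp [pvAdvance, he]] at h
          rcases hx : pvAdvance d rs with _ | nxt'
          · rw [hx] at h; simp at h
          · rw [hx] at h; simp only [Option.map_some, Option.some_inj] at h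
            subst h
            rw [List.mem_cons, ih nxt' hx r, List.mem_cons]
            constructor
            · rintro (rfl | ⟨h1, h2⟩)
              · exact ⟨he, Or.inl rfl⟩
              · exact ⟨h1, Or.inr h2⟩
            · rintro ⟨h1, h2 | h2⟩
              · injection h2 with _ h3; exact Or.inl h3
              · exact Or.inr ⟨h1, h2⟩
      · rw [show pvAdvance c ((d :: ds) :: rs) = pvAdvance c rs by simp [pvAdvance, hd]] at h
        rw [ih nxt h r, List.mem_cons]
        constructor
        · rintro ⟨h1, h2⟩; exact ⟨h1, Or.inr h2⟩
        · rintro ⟨h1, h2 | h2⟩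
          · injection h2 with h3 _; exact absurd h3.symm hd
          · exact ⟨h1, h2⟩

-- proof-side view of the streaming scan on already-normalized characters
def pvScanN : List Char → List (List Char) → Bool
  | [], _ => false
  | c :: rest, pending =>
    match pvAdvance c (pending ++ pvTokensNorm) with
    | none => true
    | some nxt => pvScanN rest nxt

-- the raw scan equals the scan over the normalized characters
lemma pvStepScan_eq_scanN (cs : List Char) (pending : List (List Char)) :
    pvStepScan cs pending = pvScanN (pvNormA cs) pending := by
  induction cs generalizing pending with
  | nil => rfl
  | cons c t ih =>
    rw [pvNormA_cons]
    by_cases h : PySem.Chars.isalnum c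
    · simp only [pvStepScan, h, if_true]
      rw [pvScanN]
      rcases hx : pvAdvance (PySem.Chars.lowerChar c) (pending ++ pvTokensNorm) with _ | nxt
      · rfl
      · exact ih nxt
    · simp only [pvStepScan, h]
      rw [if_neg (by simp : ¬ false = true)]
      exact ih pending

-- correctness of the streaming matcher: it fires iff some still-pending suffix is a prefix of the
-- remaining normalized text, or some token occurs somewhere in it
lemma pvScanN_iff (ns : List Char) : ∀ (pending : List (List Char)),
    (∀ r ∈ pending, r ≠ []) →
    (pvScanN ns pending = true ↔
      (∃ r ∈ pending, r <+: ns) ∨ ∃ t ∈ pvTokensNorm, ∃ i, t <+: ns.drop i) := by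
  induction ns with
  | nil =>
    intro pending hpend
    simp only [pvScanN, List.drop_nil, List.prefix_nil]
    constructor
    · intro h; cases h
    · rintro (⟨r, hr, h⟩ | ⟨t, ht, _, h⟩)
      · exact absurd h (hpend r hr)
      · exact absurd h (pvToks_ne t ht)
  | cons c rest ih =>
    intro pending hpend
    have hall : ∀ r ∈ pending ++ pvTokensNorm, r ≠ [] := by
      intro r hr
      rcases List.mem_append.mp hr with h | h
      · exact hpend r h
      · exact pvToks_ne r h
    -- rewrite the RHS into 'some member of pending ++ tokens is a prefix of c::rest, or token in rest'
    have hRHS : ((∃ r ∈ pending, r <+: c :: rest) ∨ ∃ t ∈ pvTokensNorm, ∃ i, t <+: (c :: rest).drop i)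
        ↔ ((∃ r ∈ pending ++ pvTokensNorm, r <+: c :: rest) ∨
            ∃ t ∈ pvTokensNorm, ∃ i, t <+: rest.drop i) := by
      constructor
      · rintro (⟨r, hr, h⟩ | ⟨t, ht, i, h⟩)
        · exact Or.inl ⟨r, List.mem_append.mpr (Or.inl hr), h⟩
        · match i with
          | 0 => exact Or.inl ⟨t, List.mem_append.mpr (Or.inr ht), h⟩
          | i + 1 => exact Or.inr ⟨t, ht, i, h⟩
      · rintro (⟨r, hr, h⟩ | ⟨t, ht, i, h⟩)
        · rcases List.mem_append.mp hr with h1 | h1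
          · exact Or.inl ⟨r, h1, h⟩
          · exact Or.inr ⟨r, h1, 0, by simpa using h⟩
        · exact Or.inr ⟨t, ht, i + 1, by simpa using h⟩
    rw [pvScanN, hRHS]
    rcases hx : pvAdvance c (pending ++ pvTokensNorm) with _ | nxt
    · -- matcher fires now: [c] is among the suffixes
      have hm : [c] ∈ pending ++ pvTokensNorm := (pvAdvance_none_iff _ _).mp hx
      simp only [true_iff]
      exact Or.inl ⟨[c], hm, by simp⟩
    · have hmem := pvAdvance_some_mem c _ nxt hx
      have hnotnow : [c] ∉ pending ++ pvTokensNorm := by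
        intro h; rw [← pvAdvance_none_iff c] at h; simp [hx] at h
      rw [ih nxt (fun r hr => ((hmem r).mp hr).1)]
      constructor
      · rintro (⟨r, hr, h⟩ | h)
        · rcases (hmem r).mp hr with ⟨h1, h2⟩
          exact Or.inl ⟨c :: r, h2, by simpa using h⟩
        · exact Or.inr h
      · rintro (⟨r, hr, h⟩ | h)
        · match r, hr, h with
          | [], hr, h => exact absurd rfl (hall [] hr)
          | d :: ds, hr, h =>
            have hc : d = c ∧ ds <+: rest := by simpa [List.cons_prefix_cons] using h
            rcases hc with ⟨rfl, hds⟩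
            by_cases hds0 : ds = []
            · subst hds0; exact absurd hr hnotnow
            · exact Or.inl ⟨ds, (hmem ds).mpr ⟨hds0, hr⟩, hds⟩
        · exact Or.inr h

-- per-header predicates of the two ports coincide
lemma pvPred_eq (h : String) :
    (pvPiiTokens.any (fun tok =>
        let token_norm := pvNormA tok.toList
        !token_norm.isEmpty && PySem.Chars.isIn token_norm (pvNormA h.toList)))
      = pvStepScan h.toList [] := by
  rw [pvStepScan_eq_scanN, Bool.eq_iff_iff,
    pvScanN_iff (pvNormA h.toList) [] (by simp)]
  simp only [List.any_eq_true, List.mem_nil_iff, false_and, exists_false, false_or,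
    Bool.and_eq_true, Bool.not_eq_true', List.isEmpty_eq_false_iff,
    ← PySem.Chars.exists_prefix_drop_iff_isIn]
  constructor
  · rintro ⟨tok, htok, h1, i, h2⟩
    refine ⟨pvNormA tok.toList, ?_, i, h2⟩
    rw [pvNorm_eq]
    simp only [pvTokensNorm, List.mem_filter, PySem.List.mem_dedup, List.mem_map]
    exact ⟨⟨tok, htok, rfl⟩, by simpa [← pvNorm_eq] using h1⟩
  · rintro ⟨t, ht, i, h2⟩
    simp only [pvTokensNorm, List.mem_filter, PySem.List.mem_dedup, List.mem_map] at ht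
    rcases ht with ⟨⟨tok, htok, rfl⟩, hne⟩
    exact ⟨tok, htok, by simpa [pvNorm_eq] using hne, i, by rw [pvNorm_eq]; exact h2⟩

-- the equality itself, by induction on the header list
lemma pvMain_eq (headers : List String) :
    has_pii_like_header headers = has_pii_like_header_alt headers := by
  induction headers with
  | nil => rfl
  | cons h rest ih =>
    rw [has_pii_like_header, has_pii_like_header_alt, pvPred_eq h, ih]

-- ===== VERDICT (by name: the statement is the Claim_ definition above) =====
theorem has_pii_like_header_spec : Claim_equal_has_pii_like_header := by
  intro headers _
  exact pvMain_eq headers
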